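-- pv_equiv track=rewrite | github.com/sibuzu/ffmpeg | dvd/jumpcut.py | calcCCRange
-- ===== SOURCE A (Python) =====
-- def calcCCRange(has_cc):
--     n = len(has_cc)
--     rng = []
--
--     cc = has_cc[0]
--     start = 0
--     for i in range(1, n):
--         if has_cc[i] != cc:
--             if cc > 0:
--                 rng.append((start, i))
--             cc = has_cc[i]
--             start = i
--
--     if cc > 0:
--         rng.append((start, n))
--     return rng
-- ===== SOURCE B (Python) =====
-- def calcCCRange(has_cc):
--     n = len(has_cc)
--     cuts = [i for i in range(1, n) if has_cc[i] != has_cc[i - 1]]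
--     bounds = [0] + cuts + [n]
--     return [(s, e) for s, e in zip(bounds, bounds[1:]) if has_cc[s] > 0]
-- ===== Notes on version B (the rewrite author's own statement) =====
-- stated objective: alternative
-- what changed: Instead of a stateful scan carrying (current value, run start) and appending as it goes, B works in stages: it first computes the list of change-point indices (where has_cc[i] != has_cc[i-1]), forms the boundary list consisting of 0, the cut indices, and n, and then pairs consecutive boundaries with zip, keeping the pairs whose start element is positive.
import Mathlib
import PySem

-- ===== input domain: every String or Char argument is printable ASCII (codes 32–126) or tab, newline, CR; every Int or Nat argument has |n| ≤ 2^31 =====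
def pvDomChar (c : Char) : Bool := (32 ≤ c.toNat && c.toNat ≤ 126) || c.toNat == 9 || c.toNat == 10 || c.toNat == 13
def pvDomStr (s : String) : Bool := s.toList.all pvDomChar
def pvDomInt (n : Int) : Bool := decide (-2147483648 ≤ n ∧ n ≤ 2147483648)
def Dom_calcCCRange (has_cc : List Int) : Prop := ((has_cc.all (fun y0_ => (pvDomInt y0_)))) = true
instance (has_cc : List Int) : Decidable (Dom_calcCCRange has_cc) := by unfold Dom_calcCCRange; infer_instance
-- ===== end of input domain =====

-- B replaces A's stateful scan by staged passes: change points, then boundary pairs via zip.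
-- A mutates nothing; the equivalence is about the return value.

-- ===== PORT A =====
def calcCCRange (has_cc : List Int) : List (Int × Int) :=
  let n : Int := has_cc.length
  let res := (PySem.List.pyRange 1 n 1).foldl
    (fun (s : Int × Int × List (Int × Int)) (i : Int) =>
      if PySem.List.pyGetD has_cc i 0 ≠ s.1 then
        (PySem.List.pyGetD has_cc i 0, i, s.2.2 ++ (if s.1 > 0 then [(s.2.1, i)] else []))
      else s)
    (PySem.List.pyGetD has_cc 0 0, 0, ([] : List (Int × Int)))
  res.2.2 ++ (if res.1 > 0 then [(res.2.1, n)] else [])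

-- ===== PORT B =====
def calcCCRange_alt (has_cc : List Int) : List (Int × Int) :=
  let n : Int := has_cc.length
  let cuts := (PySem.List.pyRange 1 n 1).filter
    (fun i => decide (PySem.List.pyGetD has_cc i 0 ≠ PySem.List.pyGetD has_cc (i - 1) 0))
  let bounds := [(0 : Int)] ++ cuts ++ [n]
  (bounds.zip (PySem.List.slice bounds (some 1) none)).filter
    (fun p => decide (0 < PySem.List.pyGetD has_cc p.1 0))

-- ===== PRECONDITION & SPEC =====
-- Pre_ excludes only the empty list, on which A raises IndexError from indexing the first element, as does B when indexing the first boundary start.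
def Pre_calcCCRange (has_cc : List Int) : Prop := has_cc ≠ []
instance (has_cc : List Int) : Decidable (Pre_calcCCRange has_cc) := by unfold Pre_calcCCRange; infer_instance
def pvWitness_calcCCRange : List Int := [1, 1, 0, 2]

def Spec_calcCCRange (has_cc : List Int) (out : List (Int × Int)) : Prop := out = calcCCRange_alt has_cc
instance (has_cc : List Int) (out : List (Int × Int)) : Decidable (Spec_calcCCRange has_cc out) := by unfold Spec_calcCCRange; infer_instance

-- ===== CLAIM (what is proved, stated in full; the proofs are below) =====
def Claim_equal_calcCCRange : Prop := ∀ (has_cc : List Int), Dom_calcCCRange has_cc → Pre_calcCCRange has_cc → Spec_calcCCRange has_cc (calcCCRange has_cc)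

-- ===== LEMMAS AND PROOFS =====

-- common normal form: run-by-run recursion producing the positive ranges
def altGo (idx : Int) : List Int → List (Int × Int)
  | [] => []
  | v :: rest =>
      let len : Int := 1 + (rest.takeWhile (fun y => y == v)).length
      let tail := altGo (idx + len) (rest.dropWhile (fun y => y == v))
      if v > 0 then (idx, idx + len) :: tail else tail
termination_by l => l.length
decreasing_by
  simp only [List.length_cons]
  exact Nat.lt_succ_of_le (List.length_dropWhile_le _ _)

lemma getD_of_drop (f : List Int) (idx : Nat) (a : Int) (t : List Int)
    (h : f.drop idx = a :: t) : PySem.List.pyGetD f (idx : Int) 0 = a := by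
  rw [PySem.List.pyGetD_natCast]
  have hx : f[idx]? = some a := by
    have : (f.drop idx)[0]? = some a := by rw [h]; rfl
    simpa [List.getElem?_drop] using this
  simp [List.getD_eq_getElem?_getD, hx]

-- ---- A's loop as structural recursion ----
def goA : List Int → Int → Int → List (Int × Int) → Int → (Int × Int × List (Int × Int))
  | [], cc, start, rng, _ => (cc, start, rng)
  | x :: t, cc, start, rng, idx =>
      if x ≠ cc then goA t x idx (rng ++ (if cc > 0 then [(start, idx)] else [])) (idx + 1)
      else goA t cc start rng (idx + 1)

def stepA (full : List Int) (s : Int × Int × List (Int × Int)) (i : Int) : Int × Int × List (Int × Int) :=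
  if PySem.List.pyGetD full i 0 ≠ s.1 then
    (PySem.List.pyGetD full i 0, i, s.2.2 ++ (if s.1 > 0 then [(s.2.1, i)] else []))
  else s

lemma bridge (full : List Int) : ∀ (t : List Int) (idx : Nat), full.drop idx = t →
    ∀ (s : Int × Int × List (Int × Int)),
    (PySem.List.pyRange (idx : Int) (full.length : Int) 1).foldl (stepA full) s
      = goA t s.1 s.2.1 s.2.2 (idx : Int) := by
  intro t
  induction t with
  | nil =>
      intro idx h s
      have hlen : full.length ≤ idx := by
        have := congrArg List.length h
        simp [List.length_drop] at this
        omega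
      rw [PySem.List.pyRange_one_eq_nil (by exact_mod_cast hlen)]
      simp [goA]
  | cons x t ih =>
      intro idx h s
      have hidx : idx < full.length := by
        by_contra hge
        rw [List.drop_eq_nil_of_le (by omega)] at h
        exact List.cons_ne_nil x t h.symm
      have hget := getD_of_drop full idx x t h
      rw [PySem.List.pyRange_one_cons (by exact_mod_cast hidx), List.foldl_cons]
      have hdrop : full.drop (idx + 1) = t := by
        have := congrArg (List.drop 1) h
        simpa [List.drop_drop, Nat.add_comm] using this
      have := ih (idx + 1) hdrop (stepA full s ((idx : Nat) : Int))
      push_cast at this ⊢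
      rw [this]
      conv_rhs => rw [goA]
      unfold stepA
      rw [hget]
      by_cases hx : x = s.1 <;> simp [hx]

def finishA (s : Int × Int × List (Int × Int)) (n : Int) : List (Int × Int) :=
  s.2.2 ++ (if s.1 > 0 then [(s.2.1, n)] else [])

lemma takeWhile_replicate_append (k : Nat) (cc : Int) (l : List Int) :
    ((List.replicate k cc ++ l).takeWhile (fun y => y == cc))
      = List.replicate k cc ++ l.takeWhile (fun y => y == cc) := by
  induction k with
  | zero => simp
  | succ k ih => simp [List.replicate_succ, ih]

lemma dropWhile_replicate_append (k : Nat) (cc : Int) (l : List Int) :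
    ((List.replicate k cc ++ l).dropWhile (fun y => y == cc))
      = l.dropWhile (fun y => y == cc) := by
  induction k with
  | zero => simp
  | succ k ih => simp [List.replicate_succ, ih]

lemma main_lemma : ∀ (t : List Int) (cc start : Int) (k : Nat) (rng : List (Int × Int)),
    finishA (goA t cc start rng (start + ((k : Int) + 1))) (start + ((k : Int) + 1) + (t.length : Int))
      = rng ++ altGo start (cc :: (List.replicate k cc ++ t)) := by
  intro t
  induction t with
  | nil =>
      intro cc start k rng
      rw [altGo, takeWhile_replicate_append, dropWhile_replicate_append]
      simp only [goA, finishA, List.takeWhile_nil, List.dropWhile_nil, List.append_nil,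
        List.length_replicate, List.length_nil]
      by_cases hc : cc > 0 <;> simp [hc, altGo] <;> omega
  | cons x t ih =>
      intro cc start k rng
      by_cases hx : x = cc
      · subst hx
        rw [goA, if_neg (by simp)]
        have hih := ih x start (k + 1) rng
        rw [List.replicate_succ', List.append_assoc, List.singleton_append] at hih
        simp only [List.length_cons] at ⊢
        push_cast at hih ⊢
        rw [show start + ((k:Int) + 1 + 1) = start + ((k:Int) + 1) + 1 by ring] at hih
        rw [show start + ((k:Int) + 1) + ((t.length:Int) + 1) = start + ((k:Int) + 1 + 1) + (t.length:Int) by ring,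
            show start + ((k:Int) + 1 + 1) = start + ((k:Int) + 1) + 1 by ring]
        exact hih
      · rw [goA, if_pos (by simpa using hx)]
        have hih := ih x (start + ((k : Int) + 1)) 0
          (rng ++ (if cc > 0 then [(start, start + ((k : Int) + 1))] else []))
        simp only [List.length_cons] at ⊢
        push_cast at hih ⊢
        simp only [List.nil_append] at hih
        rw [show start + ((k:Int) + 1) + ((t.length:Int) + 1) = start + ((k:Int)+1) + 1 + (t.length:Int) by ring]
        rw [hih]
        conv_rhs => rw [altGo]
        have htw : ((List.replicate k cc ++ x :: t).takeWhile (fun y => y == cc))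
            = List.replicate k cc := by
          rw [takeWhile_replicate_append, List.takeWhile_cons]
          simp [hx]
        have hdw : ((List.replicate k cc ++ x :: t).dropWhile (fun y => y == cc))
            = x :: t := by
          rw [dropWhile_replicate_append, List.dropWhile_cons]
          simp [hx]
        rw [htw, hdw]
        simp only [List.length_replicate]
        by_cases hc : cc > 0
        · simp [hc, List.append_assoc]
          exact ⟨by omega, by rw [show start + (1 + (k:Int)) = start + ((k:Int) + 1) by ring]⟩
        · simp [hc]
          rw [show start + (1 + (k:Int)) = start + ((k:Int) + 1) by ring]

lemma A_eq_altGo (f : List Int) (hpre : f ≠ []) : calcCCRange f = altGo 0 f := by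
  unfold calcCCRange
  cases f with
  | nil => exact absurd rfl hpre
  | cons x t =>
      simp only []
      have hb := bridge (x :: t) t 1 (by simp) (PySem.List.pyGetD (x :: t) 0 0, 0, ([] : List (Int × Int)))
      have hstep : (fun (s : Int × Int × List (Int × Int)) (i : Int) =>
          if PySem.List.pyGetD (x :: t) i 0 ≠ s.1 then
            (PySem.List.pyGetD (x :: t) i 0, i, s.2.2 ++ (if s.1 > 0 then [(s.2.1, i)] else []))
          else s) = stepA (x :: t) := by
        funext s i; rfl
      rw [hstep]
      push_cast at hb
      rw [hb]
      have hm := main_lemma t (PySem.List.pyGetD (x :: t) 0 0) 0 0 []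
      simp only [PySem.List.pyGetD_zero_cons, List.replicate_zero, List.nil_append,
        List.length_cons] at hm ⊢
      unfold finishA at hm
      push_cast at hm ⊢
      rw [show (1:Int) + (t.length:Int) = (t.length:Int) + 1 by ring] at hm
      simpa using hm

-- ---- B's staged passes: change points as structural recursion ----
def cutsL (idx : Int) : List Int → List Int
  | a :: b :: t => (if b ≠ a then [idx + 1] else []) ++ cutsL (idx + 1) (b :: t)
  | _ => []

lemma cuts_bridge (f : List Int) : ∀ (t : List Int) (idx : Nat), f.drop idx = t →
    ((PySem.List.pyRange ((idx : Int) + 1) (f.length : Int) 1).filter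
      (fun i => decide (PySem.List.pyGetD f i 0 ≠ PySem.List.pyGetD f (i - 1) 0)))
      = cutsL (idx : Int) t := by
  intro t
  induction t with
  | nil =>
      intro idx h
      have hlen : f.length ≤ idx := by
        have := congrArg List.length h
        simp [List.length_drop] at this
        omega
      rw [PySem.List.pyRange_one_eq_nil (by exact_mod_cast Nat.le_succ_of_le hlen)]
      simp [cutsL]
  | cons a t ih =>
      intro idx h
      cases t with
      | nil =>
          have hlen : f.length = idx + 1 := by
            have := congrArg List.length h
            simp [List.length_drop] at this
            omega
          rw [PySem.List.pyRange_one_eq_nil (by rw [hlen]; push_cast; omega)]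
          simp [cutsL]
      | cons b t' =>
          have hlen : idx + 1 < f.length := by
            have := congrArg List.length h
            simp [List.length_drop] at this
            omega
          have hdrop : f.drop (idx + 1) = b :: t' := by
            have := congrArg (List.drop 1) h
            simpa [List.drop_drop, Nat.add_comm] using this
          have hga := getD_of_drop f idx a (b :: t') h
          have hgb := getD_of_drop f (idx + 1) b t' hdrop
          rw [PySem.List.pyRange_one_cons (by exact_mod_cast hlen), List.filter_cons]
          have hih := ih (idx + 1) hdrop
          push_cast at hih hgb ⊢
          rw [show (idx : Int) + 1 - 1 = (idx : Int) by ring, hga, hgb, hih]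
          show _ = cutsL (idx : Int) (a :: b :: t')
          rw [cutsL]
          by_cases hba : b = a <;> simp [hba]

lemma not_head_dropWhile {p : Int → Bool} : ∀ (l : List Int) {w : Int} {r : List Int},
    l.dropWhile p = w :: r → p w = false := by
  intro l
  induction l with
  | nil => intro w r h; simp at h
  | cons x t ih =>
      intro w r h
      rw [List.dropWhile_cons] at h
      by_cases hx : p x
      · rw [if_pos hx] at h; exact ih h
      · rw [if_neg hx] at h
        cases h; simpa using hx

lemma takeWhile_eq_replicate (v : Int) (l : List Int) :
    l.takeWhile (fun y => y == v) = List.replicate (l.takeWhile (fun y => y == v)).length v := by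
  rw [List.eq_replicate_iff]
  refine ⟨rfl, ?_⟩
  intro b hb
  have := List.mem_takeWhile_imp hb
  simpa using this

lemma cutsL_run (k : Nat) : ∀ (idx v : Int) (l : List Int),
    cutsL idx (v :: (List.replicate k v ++ l)) = cutsL (idx + k) (v :: l) := by
  induction k with
  | zero => intro idx v l; simp
  | succ k ih =>
      intro idx v l
      rw [List.replicate_succ, List.cons_append, cutsL, if_neg (by simp), List.nil_append, ih]
      push_cast
      ring_nf

lemma cutsL_single (idx a : Int) : cutsL idx [a] = [] := rfl

lemma cutsL_cons2 (idx a b : Int) (t : List Int) :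
    cutsL idx (a :: b :: t) = (if b ≠ a then [idx + 1] else []) ++ cutsL (idx + 1) (b :: t) := rfl

lemma zip_lemma (f : List Int) : ∀ (N : Nat) (t : List Int) (idx : Nat),
    t.length ≤ N → f.drop idx = t → t ≠ [] →
    ((((idx : Int) :: cutsL (idx : Int) t ++ [(idx : Int) + t.length]).zip
        (cutsL (idx : Int) t ++ [(idx : Int) + t.length])).filter
      (fun p => decide (0 < PySem.List.pyGetD f p.1 0)))
      = altGo (idx : Int) t := by
  intro N
  induction N with
  | zero =>
      intro t idx hN h hne
      exact absurd (List.eq_nil_of_length_eq_zero (Nat.le_zero.mp hN)) hne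
  | succ N ih =>
      intro t idx hN h hne
      cases t with
      | nil => exact absurd rfl hne
      | cons v rest =>
          set k := (rest.takeWhile (fun y => y == v)).length with hk
          set rest' := rest.dropWhile (fun y => y == v) with hrest'
          have hsplit : rest = List.replicate k v ++ rest' := by
            conv_lhs => rw [← List.takeWhile_append_dropWhile (p := fun y => y == v) (l := rest)]
            rw [← hrest', hk, ← takeWhile_eq_replicate]
          have hgv := getD_of_drop f idx v rest h
          have hlen : (v :: rest).length = k + 1 + rest'.length := by
            rw [hsplit]; simp; omega
          have hdrop' : f.drop (idx + (k + 1)) = rest' := by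
            have h1 : f.drop (idx + (k + 1)) = (f.drop idx).drop (k + 1) := by
              rw [List.drop_drop]
            rw [h1, h, hsplit]
            simp [List.drop_left']
          have hcuts : cutsL (idx : Int) (v :: rest) = cutsL ((idx : Int) + k) (v :: rest') := by
            rw [hsplit, cutsL_run]
          rw [altGo]
          simp only [← hk, ← hrest']
          cases hr' : rest' with
          | nil =>
              have hlen2 : ((v :: rest).length : Int) = 1 + k := by
                rw [hlen, hr']; push_cast [List.length_nil]; ring
              rw [hcuts, hr', cutsL_single, hlen2]
              simp only [List.nil_append, List.zip_cons_cons, List.filter_cons, hgv,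
                List.cons_append]
              by_cases hv : 0 < v
              · rw [if_pos (by simpa using hv), if_pos (by simpa using hv)]
                simp [altGo]
              · rw [if_neg (by simpa using hv), if_neg (by simpa using hv)]
                simp [altGo]
          | cons w r2 =>
              have hwv : w ≠ v := by
                have := not_head_dropWhile (p := fun y => y == v) rest (by rw [← hrest', hr'])
                simpa using this
              have hidx' : ((idx + (k + 1) : Nat) : Int) = (idx : Int) + k + 1 := by push_cast; ring
              have hcuts2 : cutsL (idx : Int) (v :: rest)
                  = ((idx + (k + 1) : Nat) : Int) :: cutsL ((idx + (k + 1) : Nat) : Int) (w :: r2) := by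
                rw [hcuts, hr', cutsL_cons2, if_pos (by simpa using hwv), List.singleton_append, hidx']
              have hlen2 : (idx : Int) + ((v :: rest).length : Int)
                  = ((idx + (k + 1) : Nat) : Int) + ((w :: r2).length : Int) := by
                rw [hlen, hr']; push_cast; ring
              have hrlen : (w :: r2).length ≤ N := by
                have h1 : rest.length + 1 ≤ N + 1 := by simpa using hN
                have h2 : rest.length + 1 = k + 1 + (w :: r2).length := by
                  rw [hr'] at hlen; simpa using hlen
                simp only [List.length_cons] at h2 ⊢
                omega
              have hih := ih (w :: r2) (idx + (k + 1)) hrlen (by rw [hdrop', hr']) (by simp)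
              rw [hcuts2, hlen2]
              simp only [List.cons_append, List.zip_cons_cons, List.filter_cons, hgv]
              have hoff : (idx : Int) + (1 + (k : Int)) = ((idx + (k + 1) : Nat) : Int) := by
                push_cast; ring
              rw [hoff]
              by_cases hv : 0 < v
              · rw [if_pos (by simpa using hv), if_pos (by simpa using hv)]
                exact congrArg (List.cons _) hih
              · rw [if_neg (by simpa using hv), if_neg (by simpa using hv)]
                exact hih

lemma B_eq_altGo (f : List Int) (hpre : f ≠ []) : calcCCRange_alt f = altGo 0 f := by
  unfold calcCCRange_alt
  simp only []
  have hc := cuts_bridge f f 0 (by simp)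
  push_cast at hc
  rw [hc, PySem.List.slice_from_one]
  have hz := zip_lemma f f.length f 0 (le_refl _) (by simp) hpre
  push_cast at hz
  simpa using hz

-- ===== VERDICT (by name: the statement is the Claim_ definition above) =====
theorem calcCCRange_spec : Claim_equal_calcCCRange := by
  intro has_cc _hd hpre
  unfold Spec_calcCCRange
  rw [A_eq_altGo has_cc hpre, B_eq_altGo has_cc hpre]
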